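-- pv_equiv track=rewrite | github.com/adilamanmohammed/FLT3 | main.py | function_remove_unproductive
-- ===== SOURCE A (Python) =====
-- def function_remove_unproductive(CFG_Grammar, terminals_list, non_terminals_list):
--     """
--    the following functionremoving thes unproductive non-terminals and productions from the CFG.
--     A non-terminal is unproductive if it does not derive any string of terminal symbols.
--     """
--     productive_char_set = set(terminals_list)
--     productive_CFG_Grammar = {}
--
--     change = True
--     while change:
--         change = False
--         for non_terminal in non_terminals_list:
--             if non_terminal not in productive_char_set:
--                 for production in CFG_Grammar.get(non_terminal, set()):
--                     #if all the symbols in a production are productive,adding the non-terminal to productive_char_set.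
--                     if all(symbol in productive_char_set for symbol in production):
--                         productive_char_set.add(non_terminal)
--                         change = True
--                         break
--
--     #removing the unproductive non-terminals and productions from the CFG.
--     for non_terminal in non_terminals_list:
--         if non_terminal in productive_char_set:
--             productive_CFG_Grammar[non_terminal] = set()
--             for production in CFG_Grammar.get(non_terminal, set()):
--                 if all(symbol in productive_char_set for symbol in production):
--                     productive_CFG_Grammar[non_terminal].add(production)
--
--     return productive_CFG_Grammar, terminals_list, productive_char_set
-- ===== SOURCE B (Python) =====
-- def function_remove_unproductive(CFG_Grammar, terminals_list, non_terminals_list):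
--     """Reverse-index/counter propagation: each production keeps a count of its
--     distinct not-yet-productive symbols; a symbol index maps each pending symbol
--     to the productions waiting on it, so no production is ever rescanned."""
--     productive = set(terminals_list)
--     prods = []   # pid -> [owner non-terminal, production string, pending-symbol count]
--     ready = {}   # nt -> some production of nt has count 0
--     occ = {}     # pending symbol -> pids waiting on it (each at most once)
--     by_nt = {}   # nt -> its pids
--     for nt in non_terminals_list:
--         if nt in by_nt:
--             continue
--         ready[nt] = False
--         pids = []
--         for p in CFG_Grammar.get(nt, set()):
--             pid = len(prods)
--             c = 0
--             seen_ch = set()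
--             for ch in p:
--                 if ch in seen_ch or ch in productive:
--                     continue
--                 seen_ch.add(ch)
--                 c += 1
--                 occ.setdefault(ch, []).append(pid)
--             prods.append([nt, p, c])
--             if c == 0:
--                 ready[nt] = True
--             pids.append(pid)
--         by_nt[nt] = pids
--     while True:
--         added = 0
--         for nt in non_terminals_list:
--             if nt not in productive and ready.get(nt, False):
--                 productive.add(nt)
--                 added += 1
--                 for pid in occ.pop(nt, []):
--                     prods[pid][2] -= 1
--                     if prods[pid][2] == 0:
--                         ready[prods[pid][0]] = True
--         if added == 0:
--             break
--     grammar = {nt: {prods[pid][1] for pid in by_nt[nt] if prods[pid][2] == 0}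
--                for nt in non_terminals_list if nt in productive}
--     return grammar, terminals_list, productive
-- ===== Notes on version B (the rewrite author's own statement) =====
-- stated objective: alternative
-- what changed: B never re-evaluates 'all(symbol in set)': it builds, once, a reverse index symbol->waiting productions with a per-production counter of distinct pending symbols and per-non-terminal ready flags; marking a symbol productive propagates by counter decrements, each sweep only tests flags, and the final grammar is filtered by the counters instead of rescanning productions.
import Mathlib
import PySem

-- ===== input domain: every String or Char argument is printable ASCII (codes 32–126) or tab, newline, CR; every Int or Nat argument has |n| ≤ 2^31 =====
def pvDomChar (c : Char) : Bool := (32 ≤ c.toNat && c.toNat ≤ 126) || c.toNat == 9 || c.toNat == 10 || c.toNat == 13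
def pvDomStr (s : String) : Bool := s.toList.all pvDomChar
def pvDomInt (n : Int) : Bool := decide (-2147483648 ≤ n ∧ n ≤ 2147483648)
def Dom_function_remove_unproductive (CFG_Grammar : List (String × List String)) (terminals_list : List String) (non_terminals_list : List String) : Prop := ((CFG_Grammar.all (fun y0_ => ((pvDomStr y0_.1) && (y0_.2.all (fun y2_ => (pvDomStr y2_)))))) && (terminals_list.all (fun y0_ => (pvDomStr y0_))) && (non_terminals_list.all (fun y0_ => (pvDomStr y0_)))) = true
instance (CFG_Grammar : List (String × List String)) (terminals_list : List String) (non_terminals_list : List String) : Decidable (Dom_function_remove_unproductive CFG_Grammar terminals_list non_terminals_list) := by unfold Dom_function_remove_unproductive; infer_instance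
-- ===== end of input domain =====

-- B replaces A's repeated rescans of every production by a reverse symbol index with
-- per-production pending-symbol counters: productivity is propagated by counter decrements,
-- no production is ever rescanned (objective: alternative; return value proved identical).
-- The input dict of sets is a List of pairs (lookup = first match); Python set insertion
-- order is modelled, as everywhere in PySem, by first-insertion order.

-- ===== PORT A =====
-- CFG_Grammar.get(nt, set())  (dict lookup, first match, default empty)
def pvLookup (g : List (String × List String)) (nt : String) : List String :=
  (((g.find? (fun kv => kv.1 == nt)).map (fun kv => kv.2)).getD [])

-- all(symbol in productive_char_set for symbol in production)  (symbols are the CHARACTERS of the production)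
def pvProdAll (S : PySem.Set String) (p : String) : Bool :=
  p.toList.all (fun c => PySem.Set.contains S (String.singleton c))

-- inner 'for production in …: if all(…): add; change = True; break'
def pvTryNT (S : PySem.Set String) (nt : String) : List String → PySem.Set String × Bool
  | [] => (S, false)
  | p :: ps => if pvProdAll S p then (PySem.Set.add S nt, true) else pvTryNT S nt ps

-- one 'for non_terminal in non_terminals_list' sweep, threading (set, change)
def pvPassA (g : List (String × List String)) : List String → PySem.Set String → Bool → PySem.Set String × Bool
  | [], S, change => (S, change)
  | nt :: rest, S, change =>
      if PySem.Set.contains S nt then pvPassA g rest S change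
      else
        let r := pvTryNT S nt (pvLookup g nt)
        pvPassA g rest r.1 (change || r.2)

-- 'while change:' — fuel |non_terminals_list|+1 suffices: every repeated sweep has added a new non-terminal
def pvLoopA (g : List (String × List String)) (nts : List String) : Nat → PySem.Set String → PySem.Set String
  | 0, S => S
  | fuel + 1, S =>
      let r := pvPassA g nts S false
      if r.2 then pvLoopA g nts fuel r.1 else r.1

-- final dict build: D[nt] = set(); then D[nt].add(production) for each qualifying production
def pvBuildA (g : List (String × List String)) (S : PySem.Set String) :
    List String → PySem.Dict String (List String) → PySem.Dict String (List String)
  | [], D => D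
  | nt :: rest, D =>
      if PySem.Set.contains S nt then
        pvBuildA g S rest
          ((pvLookup g nt).foldl
            (fun d p => if pvProdAll S p then d.modify nt PySem.Set.empty (fun v => PySem.Set.add v p) else d)
            (D.insert nt PySem.Set.empty))
      else pvBuildA g S rest D

def function_remove_unproductive (CFG_Grammar : List (String × List String)) (terminals_list : List String) (non_terminals_list : List String) : (List (String × List String)) × List String × List String :=
  let S0 := PySem.Set.ofList terminals_list
  let S := pvLoopA CFG_Grammar non_terminals_list (non_terminals_list.length + 1) S0
  ((pvBuildA CFG_Grammar S non_terminals_list PySem.Dict.empty).items, terminals_list, S)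

-- ===== PORT B =====
-- registration state: prods[pid] = (owner, production, pending-symbol count); ready; reverse index occ; by_nt
structure PvRSt where
  prods : List (String × String × Int)
  ready : PySem.Dict String Bool
  occ : PySem.Dict String (List Nat)
  by_nt : PySem.Dict String (List Nat)

-- sweep state of Source B's while-loop
structure PvBSt where
  S : PySem.Set String
  prods : List (String × String × Int)
  ready : PySem.Dict String Bool
  occ : PySem.Dict String (List Nat)

-- inner 'for ch in p' of the registration: count distinct pending symbols, index them
def pvRegChars (S0 : PySem.Set String) (pid : Nat) :
    List Char → PySem.Set String → Int → PySem.Dict String (List Nat) →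
    Int × PySem.Dict String (List Nat)
  | [], _, c, occ => (c, occ)
  | ch :: rest, seenCh, c, occ =>
      let s := String.singleton ch
      if PySem.Set.contains seenCh s || PySem.Set.contains S0 s then
        pvRegChars S0 pid rest seenCh c occ
      else
        pvRegChars S0 pid rest (PySem.Set.add seenCh s) (c + 1)
          (occ.modify s [] (fun l => l ++ [pid]))

-- 'for p in CFG_Grammar.get(nt, set())' of the registration
def pvRegProds (S0 : PySem.Set String) (nt : String) :
    List String → List (String × String × Int) → PySem.Dict String Bool →
    PySem.Dict String (List Nat) → List Nat →
    List (String × String × Int) × PySem.Dict String Bool × PySem.Dict String (List Nat) × List Nat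
  | [], prods, ready, occ, pids => (prods, ready, occ, pids)
  | p :: ps, prods, ready, occ, pids =>
      let pid := prods.length
      let r := pvRegChars S0 pid p.toList PySem.Set.empty 0 occ
      pvRegProds S0 nt ps (prods ++ [(nt, p, r.1)])
        (if r.1 == 0 then ready.insert nt true else ready) r.2 (pids ++ [pid])

-- 'for nt in non_terminals_list' of the registration (first occurrences only)
def pvRegister (g : List (String × List String)) (S0 : PySem.Set String) :
    List String → PvRSt → PvRSt
  | [], st => st
  | nt :: rest, st =>
      if st.by_nt.contains nt then pvRegister g S0 rest st
      else
        let r := pvRegProds S0 nt (pvLookup g nt) st.prods (st.ready.insert nt false) st.occ []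
        pvRegister g S0 rest ⟨r.1, r.2.1, r.2.2.1, st.by_nt.insert nt r.2.2.2⟩

-- 'for pid in occ.pop(nt, []): cnt -= 1; if 0: ready[owner] = True'
def pvDecs (prods : List (String × String × Int)) (ready : PySem.Dict String Bool) :
    List Nat → List (String × String × Int) × PySem.Dict String Bool
  | [] => (prods, ready)
  | pid :: rest =>
      let t := prods.getD pid ("", "", 0)
      let prods' := prods.set pid (t.1, t.2.1, t.2.2 - 1)
      let ready' := if t.2.2 - 1 == 0 then ready.insert t.1 true else ready
      pvDecs prods' ready' rest

-- one 'for nt in non_terminals_list' sweep of Source B's while-loop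
def pvPassB : List String → PvBSt → Int → PvBSt × Int
  | [], st, added => (st, added)
  | nt :: rest, st, added =>
      if !(PySem.Set.contains st.S nt) && st.ready.getD nt false then
        let l := st.occ.getD nt []
        let occ' := st.occ.erase nt
        let r := pvDecs st.prods st.ready l
        pvPassB rest ⟨PySem.Set.add st.S nt, r.1, r.2, occ'⟩ (added + 1)
      else pvPassB rest st added

-- 'while True: … if added == 0: break' — same fuel bound as A's loop
def pvLoopB (nts : List String) : Nat → PvBSt → PvBSt
  | 0, st => st
  | fuel + 1, st =>
      let r := pvPassB nts st 0
      if r.2 == 0 then r.1 else pvLoopB nts fuel r.1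

-- dict comprehension {nt: {prods[pid][1] for pid in by_nt[nt] if prods[pid][2] == 0} for nt in … if nt in productive}
def pvBuildB (S : PySem.Set String) (prods : List (String × String × Int))
    (by_nt : PySem.Dict String (List Nat)) (nts : List String) : PySem.Dict String (List String) :=
  nts.foldl
    (fun d nt =>
      if PySem.Set.contains S nt then
        d.insert nt (PySem.Set.ofList
          (((by_nt.getD nt []).filter (fun pid => (prods.getD pid ("", "", 0)).2.2 == 0)).map
            (fun pid => (prods.getD pid ("", "", 0)).2.1)))
      else d)
    PySem.Dict.empty

def function_remove_unproductive_alt (CFG_Grammar : List (String × List String)) (terminals_list : List String) (non_terminals_list : List String) : (List (String × List String)) × List String × List String :=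
  let S0 := PySem.Set.ofList terminals_list
  let reg := pvRegister CFG_Grammar S0 non_terminals_list ⟨[], PySem.Dict.empty, PySem.Dict.empty, PySem.Dict.empty⟩
  let fin := pvLoopB non_terminals_list (non_terminals_list.length + 1) ⟨S0, reg.prods, reg.ready, reg.occ⟩
  ((pvBuildB fin.S fin.prods reg.by_nt non_terminals_list).items, terminals_list, fin.S)

-- ===== PRECONDITION & SPEC =====
def Spec_function_remove_unproductive (CFG_Grammar : List (String × List String)) (terminals_list : List String) (non_terminals_list : List String) (out : (List (String × List String)) × List String × List String) : Prop := out = function_remove_unproductive_alt CFG_Grammar terminals_list non_terminals_list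
instance (CFG_Grammar : List (String × List String)) (terminals_list : List String) (non_terminals_list : List String) (out : (List (String × List String)) × List String × List String) : Decidable (Spec_function_remove_unproductive CFG_Grammar terminals_list non_terminals_list out) := by unfold Spec_function_remove_unproductive; infer_instance

-- ===== CLAIM (what is proved, stated in full; the proofs are below) =====
def Claim_equal_function_remove_unproductive : Prop := ∀ (CFG_Grammar : List (String × List String)) (terminals_list : List String) (non_terminals_list : List String), Dom_function_remove_unproductive CFG_Grammar terminals_list non_terminals_list → Spec_function_remove_unproductive CFG_Grammar terminals_list non_terminals_list (function_remove_unproductive CFG_Grammar terminals_list non_terminals_list)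

-- ===== LEMMAS AND PROOFS =====

-- ---- proof-side abbreviations ----
def pOwn (prods : List (String × String × Int)) (pid : Nat) : String := (prods.getD pid ("", "", 0)).1
def pStr (prods : List (String × String × Int)) (pid : Nat) : String := (prods.getD pid ("", "", 0)).2.1
def pCnt (prods : List (String × String × Int)) (pid : Nat) : Int := (prods.getD pid ("", "", 0)).2.2

-- the characters of a production, as 1-character strings
def pvCharStrs (p : String) : List String := p.toList.map String.singleton
-- the distinct characters of p that are not yet productive
def pvPend (S : PySem.Set String) (p : String) : List String :=
  (PySem.List.dedup (pvCharStrs p)).filter (fun x => !(PySem.Set.contains S x))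
-- any(all(symbol in S for symbol in p) for p in ps)  (A's productivity test, for specs)
def pvAnyProd (S : PySem.Set String) (ps : List String) : Bool := ps.any (fun p => pvProdAll S p)
-- the distinct pending symbols pvRegChars walks over
def pvNewSyms (S0 : PySem.Set String) : List Char → PySem.Set String → List String
  | [], _ => []
  | ch :: rest, seen =>
      let s := String.singleton ch
      if PySem.Set.contains seen s || PySem.Set.contains S0 s then pvNewSyms S0 rest seen
      else s :: pvNewSyms S0 rest (PySem.Set.add seen s)

-- ---- invariants ----
def CntInv (S : PySem.Set String) (prods : List (String × String × Int)) : Prop :=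
  ∀ pid, pid < prods.length → pCnt prods pid = ((pvPend S (pStr prods pid)).length : Int)
def ReadyInv (prods : List (String × String × Int)) (ready : PySem.Dict String Bool) : Prop :=
  ∀ m : String, ready.getD m false = true ↔ ∃ pid, pid < prods.length ∧ pOwn prods pid = m ∧ pCnt prods pid = 0
def OccInv (S : PySem.Set String) (prods : List (String × String × Int)) (occ : PySem.Dict String (List Nat)) : Prop :=
  ∀ x : String, (occ.getD x []).Nodup ∧
    ∀ pid : Nat, pid ∈ occ.getD x [] ↔
      (PySem.Set.contains S x = false ∧ pid < prods.length ∧ x ∈ pvCharStrs (pStr prods pid))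
def NtSpec (g : List (String × List String)) (prods : List (String × String × Int))
    (by_nt : PySem.Dict String (List Nat)) (m : String) : Prop :=
  by_nt.contains m = true ∧
  (∀ pid ∈ by_nt.getD m [], pid < prods.length ∧ pOwn prods pid = m) ∧
  (by_nt.getD m []).map (pStr prods) = pvLookup g m ∧
  (∀ pid, pid < prods.length → pOwn prods pid = m → pid ∈ by_nt.getD m [])
def Pres (p q : List (String × String × Int)) : Prop :=
  q.length = p.length ∧ ∀ pid, pid < p.length → pOwn q pid = pOwn p pid ∧ pStr q pid = pStr p pid

-- ---- generic small lemmas ----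
theorem contains_iff_mem {S : List String} {x : String} : PySem.Set.contains S x = true ↔ x ∈ S :=
  PySem.Set.contains_iff S x

theorem getD_set_self (xs : List (String × String × Int)) (i : Nat) (v d : String × String × Int)
    (h : i < xs.length) : (xs.set i v).getD i d = v := by
  simp [List.getD, h]

theorem getD_set_ne (xs : List (String × String × Int)) (i q : Nat) (v d : String × String × Int)
    (h : q ≠ i) : (xs.set i v).getD q d = xs.getD q d := by
  simp [List.getD, List.getElem?_set_ne (Ne.symm h)]

theorem getD_append_left {α : Type} (xs ys : List α) (i : Nat) (d : α) (h : i < xs.length) :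
    (xs ++ ys).getD i d = xs.getD i d := by
  simp [List.getD, List.getElem?_append_left h]

theorem getD_append_right_self {α : Type} (xs : List α) (y : α) (d : α) :
    (xs ++ [y]).getD xs.length d = y := by
  simp [List.getD]

theorem find?_filter_ne_none {ν : Type} (k : String) :
    ∀ l : List (String × ν), (l.filter (fun p => !(p.1 == k))).find? (fun p => p.1 == k) = none := by
  intro l
  induction l with
  | nil => rfl
  | cons a rest ih =>
    by_cases h : a.1 = k
    · simp [h, ih]
    · simp [h, ih]

theorem find?_filter_ne {ν : Type} (k k' : String) (h : k' ≠ k) :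
    ∀ l : List (String × ν), (l.filter (fun p => !(p.1 == k))).find? (fun p => p.1 == k')
      = l.find? (fun p => p.1 == k') := by
  intro l
  induction l with
  | nil => rfl
  | cons a rest ih =>
    by_cases ha : a.1 = k
    · have hne : (a.1 == k') = false := by simp [ha, h.symm]
      simp only [List.filter_cons, ha, beq_self_eq_true, Bool.not_true]
      simp only [Bool.false_eq_true, if_false, ih, List.find?_cons, hne]
    · have hfc : List.filter (fun p => !(p.1 == k)) (a :: rest)
          = a :: List.filter (fun p => !(p.1 == k)) rest := by
        simp [ha]
      simp only [hfc, List.find?_cons]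
      by_cases hb : (a.1 == k') = true
      · simp [hb]
      · simp only [Bool.not_eq_true] at hb
        simp [hb, ih]

theorem getD_erase_self {ν : Type} (d : PySem.Dict String ν) (k : String) (dflt : ν) :
    (d.erase k).getD k dflt = dflt := by
  simp [PySem.Dict.erase, PySem.Dict.getD, PySem.Dict.get?, find?_filter_ne_none k d.items]

theorem getD_erase_ne {ν : Type} (d : PySem.Dict String ν) (k k' : String) (dflt : ν) (h : k' ≠ k) :
    (d.erase k).getD k' dflt = d.getD k' dflt := by
  simp [PySem.Dict.erase, PySem.Dict.getD, PySem.Dict.get?, find?_filter_ne k k' h d.items]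

theorem filter_ne_length (l : List String) (nt : String) (hd : l.Nodup) (hm : nt ∈ l) :
    (l.filter (fun x => !(x == nt))).length = l.length - 1 := by
  have hp : List.Perm l (nt :: l.erase nt) := List.perm_cons_erase hm
  have h2 := hp.filter (fun x => !(x == nt))
  rw [h2.length_eq]
  have h3 : (l.erase nt).filter (fun x => !(x == nt)) = l.erase nt := by
    apply List.filter_eq_self.2
    intro a ha
    have : a ≠ nt := by
      intro h; subst h
      exact ((List.Nodup.mem_erase_iff hd).1 ha).1 rfl
    simp [this]
  simp [h3, List.length_erase_of_mem hm]

theorem filter_map_comm {α β : Type} (l : List α) (f : α → β) (c : α → Bool) (q : β → Bool)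
    (h : ∀ x ∈ l, c x = q (f x)) : (l.filter c).map f = (l.map f).filter q := by
  induction l with
  | nil => rfl
  | cons x xs ih =>
    simp only [List.filter_cons, List.map_cons, h x (by simp)]
    cases hq : q (f x) <;> simp [ih (fun y hy => h y (by simp [hy]))]

theorem set_add_of_not_mem {S : List String} {x : String} (h : ¬ x ∈ S) :
    PySem.Set.add S x = S ++ [x] := by
  simp [PySem.Set.add, PySem.Set.contains, h]

theorem contains_add (S : List String) (nt x : String) :
    PySem.Set.contains (PySem.Set.add S nt) x = (PySem.Set.contains S x || x == nt) := by
  by_cases hx : x ∈ PySem.Set.add S nt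
  · rw [contains_iff_mem.2 hx]
    rcases (PySem.Set.mem_add S nt x).1 hx with h | h
    · rw [contains_iff_mem.2 h]; simp
    · subst h; simp
  · have h1 : PySem.Set.contains (PySem.Set.add S nt) x = false := by
      revert hx; rw [← contains_iff_mem]; cases PySem.Set.contains (PySem.Set.add S nt) x <;> simp
    have h2 : x ∉ S := fun hm => hx ((PySem.Set.mem_add S nt x).2 (Or.inl hm))
    have h3 : x ≠ nt := fun he => hx ((PySem.Set.mem_add S nt x).2 (Or.inr he))
    have h4 : PySem.Set.contains S x = false := by
      revert h2; rw [← contains_iff_mem]; cases PySem.Set.contains S x <;> simp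
    simp [h3]

-- ---- pvPend facts ----
theorem mem_pend {S : PySem.Set String} {p : String} {x : String} :
    x ∈ pvPend S p ↔ x ∈ pvCharStrs p ∧ PySem.Set.contains S x = false := by
  simp [pvPend, List.mem_filter]

theorem nodup_pend (S : PySem.Set String) (p : String) : (pvPend S p).Nodup :=
  (PySem.List.nodup_dedup _).filter _

theorem pend_len_zero_iff (S : PySem.Set String) (p : String) :
    (pvPend S p).length = 0 ↔ pvProdAll S p = true := by
  rw [List.length_eq_zero_iff, pvPend, List.filter_eq_nil_iff]
  simp only [pvProdAll, List.all_eq_true, PySem.List.mem_dedup, pvCharStrs,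
    List.mem_map, Bool.not_eq_true', Bool.not_eq_false]
  constructor
  · intro h c hc
    exact h _ ⟨c, hc, rfl⟩
  · rintro h x ⟨c, hc, rfl⟩
    exact h c hc

theorem pend_add (S : PySem.Set String) (nt : String) (p : String) :
    pvPend (PySem.Set.add S nt) p = (pvPend S p).filter (fun x => !(x == nt)) := by
  rw [pvPend, pvPend, List.filter_filter]
  apply List.filter_congr
  intro x _
  rw [contains_add]
  cases PySem.Set.contains S x <;> cases hx : (x == nt) <;> simp_all

theorem length_pend_add (S : PySem.Set String) (nt : String) (p : String) :
    ((pvPend (PySem.Set.add S nt) p).length : Int)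
      = ((pvPend S p).length : Int) - (if nt ∈ pvPend S p then 1 else 0) := by
  rw [pend_add]
  by_cases h : nt ∈ pvPend S p
  · rw [filter_ne_length _ _ (nodup_pend S p) h, if_pos h]
    have : 1 ≤ (pvPend S p).length := List.length_pos_of_mem h
    omega
  · have : (pvPend S p).filter (fun x => !(x == nt)) = pvPend S p := by
      apply List.filter_eq_self.2
      intro a ha
      have : a ≠ nt := fun he => h (he ▸ ha)
      simp [this]
    rw [this, if_neg h]
    omega

-- ---- registration: pvRegChars / pvNewSyms ----
theorem mem_newSyms (S0 : PySem.Set String) :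
    ∀ (l : List Char) (seen : PySem.Set String) (x : String),
      x ∈ pvNewSyms S0 l seen ↔
        x ∈ l.map String.singleton ∧ PySem.Set.contains seen x = false ∧
          PySem.Set.contains S0 x = false := by
  intro l
  induction l with
  | nil => intro seen x; simp [pvNewSyms]
  | cons ch rest ih =>
    intro seen x
    simp only [pvNewSyms, List.map_cons, List.mem_cons]
    by_cases h1 : PySem.Set.contains seen (String.singleton ch) = true
    · rw [if_pos (by rw [Bool.or_eq_true]; exact Or.inl h1), ih]
      constructor
      · rintro ⟨hm, hsn, h0⟩; exact ⟨Or.inr hm, hsn, h0⟩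
      · rintro ⟨hm | hm, hsn, h0⟩
        · rw [hm] at hsn; rw [hsn] at h1; cases h1
        · exact ⟨hm, hsn, h0⟩
    · have h1' : PySem.Set.contains seen (String.singleton ch) = false := by
        revert h1; cases PySem.Set.contains seen (String.singleton ch) <;> simp
      by_cases h2 : PySem.Set.contains S0 (String.singleton ch) = true
      · rw [if_pos (by rw [Bool.or_eq_true]; exact Or.inr h2), ih]
        constructor
        · rintro ⟨hm, hsn, h0⟩; exact ⟨Or.inr hm, hsn, h0⟩
        · rintro ⟨hm | hm, hsn, h0⟩
          · rw [hm] at h0; rw [h0] at h2; cases h2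
          · exact ⟨hm, hsn, h0⟩
      · have h2' : PySem.Set.contains S0 (String.singleton ch) = false := by
          revert h2; cases PySem.Set.contains S0 (String.singleton ch) <;> simp
        rw [if_neg (by rw [h1', h2']; simp)]
        simp only [List.mem_cons]
        rw [ih, contains_add]
        constructor
        · rintro (rfl | ⟨hm, hsn, h0⟩)
          · exact ⟨Or.inl rfl, h1', h2'⟩
          · have hp : PySem.Set.contains seen x = false ∧ (x == String.singleton ch) = false := by
              revert hsn
              cases PySem.Set.contains seen x <;> cases hx : (x == String.singleton ch) <;> simp
            exact ⟨Or.inr hm, hp.1, h0⟩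
        · rintro ⟨hm | hm, hsn, h0⟩
          · exact Or.inl hm
          · by_cases hxs : x = String.singleton ch
            · exact Or.inl hxs
            · refine Or.inr ⟨hm, ?_, h0⟩
              rw [hsn]
              simp [hxs]

theorem nodup_newSyms (S0 : PySem.Set String) :
    ∀ (l : List Char) (seen : PySem.Set String), (pvNewSyms S0 l seen).Nodup := by
  intro l
  induction l with
  | nil => intro seen; simp [pvNewSyms]
  | cons ch rest ih =>
    intro seen
    simp only [pvNewSyms]
    split
    · exact ih seen
    · refine List.nodup_cons.2 ⟨?_, ih _⟩
      intro hm
      have := ((mem_newSyms S0 rest _ _).1 hm).2.1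
      rw [contains_add] at this
      simp at this

theorem regChars_fst (S0 : PySem.Set String) (pid : Nat) :
    ∀ (l : List Char) (seen : PySem.Set String) (c : Int) (occ : PySem.Dict String (List Nat)),
      (pvRegChars S0 pid l seen c occ).1 = c + (pvNewSyms S0 l seen).length := by
  intro l
  induction l with
  | nil => intro seen c occ; simp [pvRegChars, pvNewSyms]
  | cons ch rest ih =>
    intro seen c occ
    simp only [pvRegChars, pvNewSyms]
    split
    · exact ih _ _ _
    · rw [ih]
      simp only [List.length_cons]
      push_cast
      ring

theorem regChars_occ (S0 : PySem.Set String) (pid : Nat) :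
    ∀ (l : List Char) (seen : PySem.Set String) (c : Int) (occ : PySem.Dict String (List Nat))
      (x : String),
      ((pvRegChars S0 pid l seen c occ).2).getD x []
        = occ.getD x [] ++ (if x ∈ pvNewSyms S0 l seen then [pid] else []) := by
  intro l
  induction l with
  | nil => intro seen c occ x; simp [pvRegChars, pvNewSyms]
  | cons ch rest ih =>
    intro seen c occ x
    simp only [pvRegChars, pvNewSyms]
    split
    · exact ih _ _ _ _
    · rw [ih]
      by_cases hx : x = String.singleton ch
      · have hnm : x ∉ pvNewSyms S0 rest (PySem.Set.add seen (String.singleton ch)) := by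
          intro hm
          have h := ((mem_newSyms S0 rest _ _).1 hm).2.1
          rw [contains_add, hx] at h
          simp at h
        rw [if_neg hnm, hx, PySem.Dict.getD_modify_self]
        simp
      · rw [PySem.Dict.getD_modify_of_ne occ [] (fun l => l ++ [pid]) hx]
        have hcm : (x ∈ String.singleton ch :: pvNewSyms S0 rest (PySem.Set.add seen (String.singleton ch)))
            ↔ x ∈ pvNewSyms S0 rest (PySem.Set.add seen (String.singleton ch)) := by
          simp [List.mem_cons, hx]
        rw [if_congr hcm rfl rfl]

theorem length_newSyms (S0 : PySem.Set String) (p : String) :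
    (pvNewSyms S0 p.toList PySem.Set.empty).length = (pvPend S0 p).length := by
  have hperm : List.Perm (pvNewSyms S0 p.toList PySem.Set.empty) (pvPend S0 p) := by
    rw [List.perm_ext_iff_of_nodup (nodup_newSyms S0 _ _) (nodup_pend S0 p)]
    intro x
    rw [mem_newSyms, mem_pend]
    simp [pvCharStrs, PySem.Set.contains, PySem.Set.empty]
  exact hperm.length_eq

-- ---- registration invariants ----
theorem regProds_spec (_g : List (String × List String)) (S0 : PySem.Set String) (nt : String) :
    ∀ (ps : List String) (prods : List (String × String × Int)) (ready : PySem.Dict String Bool)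
      (occ : PySem.Dict String (List Nat)) (pids : List Nat),
      CntInv S0 prods → ReadyInv prods ready → OccInv S0 prods occ →
      (∀ pid ∈ pids, pid < prods.length ∧ pOwn prods pid = nt) →
      (∀ pid, pid < prods.length → pOwn prods pid = nt → pid ∈ pids) →
      let r := pvRegProds S0 nt ps prods ready occ pids
      (∃ ext, r.1 = prods ++ ext ∧ ∀ e ∈ ext, e.1 = nt) ∧
      CntInv S0 r.1 ∧ ReadyInv r.1 r.2.1 ∧ OccInv S0 r.1 r.2.2.1 ∧
      (∀ pid ∈ r.2.2.2, pid < r.1.length ∧ pOwn r.1 pid = nt) ∧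
      (r.2.2.2).map (pStr r.1) = pids.map (pStr prods) ++ ps ∧
      (∀ pid, pid < r.1.length → pOwn r.1 pid = nt → pid ∈ r.2.2.2) := by
  intro ps
  induction ps with
  | nil =>
    intro prods ready occ pids hC hR hO hpids hconv
    exact ⟨⟨[], by simp [pvRegProds], by simp⟩, hC, hR, hO, hpids, by simp [pvRegProds], hconv⟩
  | cons p ps ih =>
    intro prods ready occ pids hC hR hO hpids hconv
    have hstep : pvRegProds S0 nt (p :: ps) prods ready occ pids
        = pvRegProds S0 nt ps (prods ++ [(nt, p, (pvRegChars S0 prods.length p.toList PySem.Set.empty 0 occ).1)])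
            (if (pvRegChars S0 prods.length p.toList PySem.Set.empty 0 occ).1 == 0
              then ready.insert nt true else ready)
            (pvRegChars S0 prods.length p.toList PySem.Set.empty 0 occ).2
            (pids ++ [prods.length]) := rfl
    set c := (pvRegChars S0 prods.length p.toList PySem.Set.empty 0 occ).1 with hcdef
    have hc : c = ((pvPend S0 p).length : Int) := by
      rw [hcdef, regChars_fst, length_newSyms]
      simp
    set prods' := prods ++ [(nt, p, c)] with hp'
    have hlen' : prods'.length = prods.length + 1 := by simp [hp']
    have hOwnE : ∀ q, q < prods.length → pOwn prods' q = pOwn prods q := by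
      intro q hq; unfold pOwn; rw [hp', getD_append_left _ _ _ _ hq]
    have hStrE : ∀ q, q < prods.length → pStr prods' q = pStr prods q := by
      intro q hq; unfold pStr; rw [hp', getD_append_left _ _ _ _ hq]
    have hCntE : ∀ q, q < prods.length → pCnt prods' q = pCnt prods q := by
      intro q hq; unfold pCnt; rw [hp', getD_append_left _ _ _ _ hq]
    have hOwnP : pOwn prods' prods.length = nt := by
      unfold pOwn; rw [hp', getD_append_right_self]
    have hStrP : pStr prods' prods.length = p := by
      unfold pStr; rw [hp', getD_append_right_self]
    have hCntP : pCnt prods' prods.length = c := by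
      unfold pCnt; rw [hp', getD_append_right_self]
    have hlt : ∀ q, q < prods'.length → q < prods.length ∨ q = prods.length := by
      intro q hq; rw [hlen'] at hq; omega
    -- invariants for the recursive call
    have hC' : CntInv S0 prods' := by
      intro q hq
      rcases hlt q hq with h | h
      · rw [hCntE q h, hStrE q h]; exact hC q h
      · subst h; rw [hCntP, hStrP, hc]
    have hR' : ReadyInv prods' (if c == 0 then ready.insert nt true else ready) := by
      intro m
      by_cases hz : (c == 0) = true
      · have hc0 : c = 0 := by exact_mod_cast (beq_iff_eq).1 hz
        rw [if_pos hz, PySem.Dict.getD_insert]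
        by_cases hm : m = nt
        · subst hm
          rw [if_pos rfl]
          constructor
          · intro _
            exact ⟨prods.length, by omega, hOwnP, by rw [hCntP, hc0]⟩
          · intro _; rfl
        · rw [if_neg hm, hR m]
          constructor
          · rintro ⟨q, hq, ho, hcq⟩
            exact ⟨q, by rw [hlen']; omega, by rw [hOwnE q hq]; exact ho, by rw [hCntE q hq]; exact hcq⟩
          · rintro ⟨q, hq, ho, hcq⟩
            rcases hlt q hq with h | h
            · exact ⟨q, h, by rw [← hOwnE q h]; exact ho, by rw [← hCntE q h]; exact hcq⟩
            · subst h; rw [hOwnP] at ho; exact absurd ho.symm hm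
      · have hz' : c ≠ 0 := by
          intro hcc; exact hz (by rw [hcc]; rfl)
        rw [if_neg hz, hR m]
        constructor
        · rintro ⟨q, hq, ho, hcq⟩
          exact ⟨q, by rw [hlen']; omega, by rw [hOwnE q hq]; exact ho, by rw [hCntE q hq]; exact hcq⟩
        · rintro ⟨q, hq, ho, hcq⟩
          rcases hlt q hq with h | h
          · exact ⟨q, h, by rw [← hOwnE q h]; exact ho, by rw [← hCntE q h]; exact hcq⟩
          · subst h; rw [hCntP] at hcq; exact absurd hcq hz'
    have hO' : OccInv S0 prods' (pvRegChars S0 prods.length p.toList PySem.Set.empty 0 occ).2 := by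
      intro x
      obtain ⟨hnd, hiff⟩ := hO x
      rw [regChars_occ]
      by_cases hx : x ∈ pvNewSyms S0 p.toList PySem.Set.empty
      · obtain ⟨_, hs0⟩ := (mem_newSyms S0 p.toList PySem.Set.empty x).1 hx
        refine ⟨?_, ?_⟩
        · rw [if_pos hx]
          refine List.Nodup.append hnd (by simp) ?_
          intro q hq hq'
          simp only [List.mem_singleton] at hq'
          subst hq'
          exact absurd ((hiff _).1 hq).2.1 (by omega)
        · intro q
          rw [if_pos hx, List.mem_append, hiff q]
          constructor
          · rintro (⟨h1, h2, h3⟩ | h)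
            · exact ⟨h1, by rw [hlen']; omega, by rw [hStrE q h2]; exact h3⟩
            · simp only [List.mem_singleton] at h
              subst h
              refine ⟨hs0.2, by omega, ?_⟩
              rw [hStrP]
              exact ((mem_newSyms S0 p.toList PySem.Set.empty x).1 hx).1
          · rintro ⟨h1, h2, h3⟩
            rcases hlt q h2 with h | h
            · exact Or.inl ⟨h1, h, by rw [← hStrE q h]; exact h3⟩
            · subst h; simp
      · refine ⟨?_, ?_⟩
        · rw [if_neg hx]; simpa using hnd
        · intro q
          rw [if_neg hx, List.append_nil, hiff q]
          constructor
          · rintro ⟨h1, h2, h3⟩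
            exact ⟨h1, by rw [hlen']; omega, by rw [hStrE q h2]; exact h3⟩
          · rintro ⟨h1, h2, h3⟩
            rcases hlt q h2 with h | h
            · exact ⟨h1, h, by rw [← hStrE q h]; exact h3⟩
            · subst h
              rw [hStrP] at h3
              exact absurd ((mem_newSyms S0 p.toList PySem.Set.empty x).2
                ⟨h3, by simp [PySem.Set.contains, PySem.Set.empty], h1⟩) hx
    have hpids' : ∀ q ∈ pids ++ [prods.length], q < prods'.length ∧ pOwn prods' q = nt := by
      intro q hq
      rcases List.mem_append.1 hq with h | h
      · obtain ⟨h1, h2⟩ := hpids q h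
        exact ⟨by rw [hlen']; omega, by rw [hOwnE q h1]; exact h2⟩
      · simp only [List.mem_singleton] at h
        subst h
        exact ⟨by omega, hOwnP⟩
    have hconv' : ∀ q, q < prods'.length → pOwn prods' q = nt → q ∈ pids ++ [prods.length] := by
      intro q hq ho
      rcases hlt q hq with h | h
      · rw [hOwnE q h] at ho
        exact List.mem_append_left _ (hconv q h ho)
      · subst h; simp
    obtain ⟨⟨ext, hext, hextO⟩, iC, iR, iO, ipids, imap, iconv⟩ :=
      ih prods' (if c == 0 then ready.insert nt true else ready)
        (pvRegChars S0 prods.length p.toList PySem.Set.empty 0 occ).2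
        (pids ++ [prods.length]) hC' hR' hO' hpids' hconv'
    rw [hstep]
    refine ⟨⟨(nt, p, c) :: ext, ?_, ?_⟩, iC, iR, iO, ipids, ?_, iconv⟩
    · rw [hext, hp']; simp
    · rintro e he
      rcases List.mem_cons.1 he with rfl | he'
      · rfl
      · exact hextO e he'
    · rw [imap]
      have hm1 : (pids ++ [prods.length]).map (pStr prods') = pids.map (pStr prods) ++ [p] := by
        rw [List.map_append]
        congr 1
        · apply List.map_congr_left
          intro q hq
          exact hStrE q (hpids q hq).1
        · simp [hStrP]
      rw [hm1]
      simp

def RegOK (g : List (String × List String)) (S0 : PySem.Set String) (st : PvRSt) : Prop :=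
  CntInv S0 st.prods ∧ ReadyInv st.prods st.ready ∧ OccInv S0 st.prods st.occ ∧
  (∀ m, st.by_nt.contains m = true → NtSpec g st.prods st.by_nt m) ∧
  (∀ m, st.by_nt.contains m = false → ∀ pid, pid < st.prods.length → pOwn st.prods pid ≠ m)

theorem register_spec (g : List (String × List String)) (S0 : PySem.Set String) :
    ∀ (rest : List String) (st : PvRSt), RegOK g S0 st →
      RegOK g S0 (pvRegister g S0 rest st) ∧
      (∀ m ∈ rest, (pvRegister g S0 rest st).by_nt.contains m = true) ∧
      (∀ m, st.by_nt.contains m = true → (pvRegister g S0 rest st).by_nt.contains m = true) := by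
  intro rest
  induction rest with
  | nil =>
    intro st hok
    exact ⟨hok, by simp, fun m hm => hm⟩
  | cons nt rest ih =>
    intro st hok
    obtain ⟨hC, hR, hO, hNt, hFree⟩ := hok
    by_cases hc : st.by_nt.contains nt = true
    · have hstep : pvRegister g S0 (nt :: rest) st = pvRegister g S0 rest st := by
        simp only [pvRegister, hc, if_true]
      rw [hstep]
      obtain ⟨i1, i2, i3⟩ := ih st ⟨hC, hR, hO, hNt, hFree⟩
      refine ⟨i1, ?_, i3⟩
      intro m hm
      rcases List.mem_cons.1 hm with rfl | hm'
      · exact i3 m hc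
      · exact i2 m hm'
    · have hc' : st.by_nt.contains nt = false := by
        revert hc; cases st.by_nt.contains nt <;> simp
      have hstep : pvRegister g S0 (nt :: rest) st
          = pvRegister g S0 rest
              ⟨(pvRegProds S0 nt (pvLookup g nt) st.prods (st.ready.insert nt false) st.occ []).1,
               (pvRegProds S0 nt (pvLookup g nt) st.prods (st.ready.insert nt false) st.occ []).2.1,
               (pvRegProds S0 nt (pvLookup g nt) st.prods (st.ready.insert nt false) st.occ []).2.2.1,
               st.by_nt.insert nt (pvRegProds S0 nt (pvLookup g nt) st.prods (st.ready.insert nt false) st.occ []).2.2.2⟩ := by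
        simp only [pvRegister, hc', Bool.false_eq_true, if_false]
      have hRins : ReadyInv st.prods (st.ready.insert nt false) := by
        intro m
        rw [PySem.Dict.getD_insert]
        by_cases hm : m = nt
        · rw [if_pos hm]
          constructor
          · intro h; cases h
          · rintro ⟨q, hq, ho, _⟩
            rw [hm] at ho
            exact absurd ho (hFree nt hc' q hq)
        · rw [if_neg hm]
          exact hR m
      obtain ⟨⟨ext, hext, hextO⟩, iC, iR, iO, ipids, imap, iconv⟩ :=
        regProds_spec g S0 nt (pvLookup g nt) st.prods (st.ready.insert nt false) st.occ []
          hC hRins hO (by simp) (fun q hq ho => absurd ho (hFree nt hc' q hq))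
      set r := pvRegProds S0 nt (pvLookup g nt) st.prods (st.ready.insert nt false) st.occ []
      have hOwnE : ∀ q, q < st.prods.length → pOwn r.1 q = pOwn st.prods q := by
        intro q hq; unfold pOwn; rw [hext, getD_append_left _ _ _ _ hq]
      have hStrE : ∀ q, q < st.prods.length → pStr r.1 q = pStr st.prods q := by
        intro q hq; unfold pStr; rw [hext, getD_append_left _ _ _ _ hq]
      have hOwnHigh : ∀ q, q < r.1.length → ¬ q < st.prods.length → pOwn r.1 q = nt := by
        intro q hq hq2
        rw [hext] at hq ⊢
        rw [List.length_append] at hq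
        unfold pOwn
        have h1 : q - st.prods.length < ext.length := by omega
        rw [List.getD_eq_getElem?_getD, List.getElem?_append_right (by omega)]
        have h2 := hextO ext[q - st.prods.length] (List.getElem_mem h1)
        simp only [List.getElem?_eq_getElem h1]
        exact h2
      have hok' : RegOK g S0 ⟨r.1, r.2.1, r.2.2.1, st.by_nt.insert nt r.2.2.2⟩ := by
        refine ⟨iC, iR, iO, ?_, ?_⟩
        · intro m hm
          by_cases hmn : m = nt
          · subst hmn
            refine ⟨by rw [PySem.Dict.contains_insert]; simp, ?_, ?_, ?_⟩
            · rw [PySem.Dict.getD_insert_self]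
              exact ipids
            · rw [PySem.Dict.getD_insert_self, imap]
              simp
            · intro q hq ho
              rw [PySem.Dict.getD_insert_self]
              exact iconv q hq ho
          · have hmold : st.by_nt.contains m = true := by
              rw [PySem.Dict.contains_insert, Bool.or_eq_true] at hm
              rcases hm with h | h
              · exact absurd (by simpa using h) hmn
              · exact h
            obtain ⟨n1, n2, n3, n4⟩ := hNt m hmold
            have hgd : (st.by_nt.insert nt r.2.2.2).getD m [] = st.by_nt.getD m [] :=
              PySem.Dict.getD_insert_of_ne _ _ _ hmn
            refine ⟨by rw [PySem.Dict.contains_insert]; simp [hmold], ?_, ?_, ?_⟩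
            · intro q hq
              rw [hgd] at hq
              obtain ⟨h1, h2⟩ := n2 q hq
              refine ⟨?_, by rw [hOwnE q h1]; exact h2⟩
              rw [hext, List.length_append]
              omega
            · rw [hgd, ← n3]
              apply List.map_congr_left
              intro q hq
              exact hStrE q (n2 q hq).1
            · intro q hq ho
              rw [hgd]
              by_cases hql : q < st.prods.length
              · rw [hOwnE q hql] at ho
                exact n4 q hql ho
              · rw [hOwnHigh q hq hql] at ho
                exact absurd ho.symm hmn
        · intro m hm q hq
          have hmn : m ≠ nt := by
            intro he
            subst he
            rw [PySem.Dict.contains_insert] at hm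
            simp at hm
          have hmold : st.by_nt.contains m = false := by
            rw [PySem.Dict.contains_insert] at hm
            revert hm
            cases h2 : st.by_nt.contains m
            · intro _; rfl
            · intro hm; simp at hm
          by_cases hql : q < st.prods.length
          · rw [hOwnE q hql]
            exact hFree m hmold q hql
          · rw [hOwnHigh q hq hql]
            exact fun he => hmn he.symm
      obtain ⟨i1, i2, i3⟩ := ih _ hok'
      rw [hstep]
      refine ⟨i1, ?_, ?_⟩
      · intro m hm
        rcases List.mem_cons.1 hm with rfl | hm'
        · exact i3 m (by rw [PySem.Dict.contains_insert]; simp)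
        · exact i2 m hm'
      · intro m hm
        apply i3
        rw [PySem.Dict.contains_insert]
        simp [hm]

-- ---- sweep ----
theorem not_contains_iff {S : List String} {x : String} :
    PySem.Set.contains S x = false ↔ x ∉ S := by
  rw [← contains_iff_mem]
  cases PySem.Set.contains S x <;> simp

theorem tryNT_eq (S : PySem.Set String) (nt : String) (ps : List String) :
    pvTryNT S nt ps = if pvAnyProd S ps then (PySem.Set.add S nt, true) else (S, false) := by
  induction ps with
  | nil => simp [pvTryNT, pvAnyProd]
  | cons p rest ih =>
    by_cases h : pvProdAll S p = true
    · simp [pvTryNT, pvAnyProd, h]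
    · simp only [Bool.not_eq_true] at h
      simp [pvTryNT, pvAnyProd, h, ih, pvAnyProd]

theorem passA_cons_mem {g : List (String × List String)} {x : String} {n : List String}
    {S : PySem.Set String} {change : Bool} (hx : x ∈ S) :
    pvPassA g (x :: n) S change = pvPassA g n S change := by
  simp [pvPassA, PySem.Set.contains, hx]

theorem passA_cons_not_mem {g : List (String × List String)} {x : String} {n : List String}
    {S : PySem.Set String} {change : Bool} (hx : x ∉ S) :
    pvPassA g (x :: n) S change
    = pvPassA g n (pvTryNT S x (pvLookup g x)).1 (change || (pvTryNT S x (pvLookup g x)).2) := by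
  simp [pvPassA, PySem.Set.contains, hx]

theorem Pres_refl (p : List (String × String × Int)) : Pres p p :=
  ⟨rfl, fun _ _ => ⟨rfl, rfl⟩⟩

theorem Pres_trans {p q r : List (String × String × Int)} (h1 : Pres p q) (h2 : Pres q r) :
    Pres p r := by
  obtain ⟨hl1, hc1⟩ := h1
  obtain ⟨hl2, hc2⟩ := h2
  refine ⟨hl2.trans hl1, fun pid hpid => ?_⟩
  obtain ⟨ho1, hs1⟩ := hc1 pid hpid
  obtain ⟨ho2, hs2⟩ := hc2 pid (hl1 ▸ hpid)
  exact ⟨ho2.trans ho1, hs2.trans hs1⟩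

theorem decs_spec (_g : List (String × List String)) :
    ∀ (l : List Nat) (prods : List (String × String × Int)) (ready : PySem.Dict String Bool),
      l.Nodup → (∀ pid ∈ l, pid < prods.length) →
      let r := pvDecs prods ready l
      r.1.length = prods.length ∧
      (∀ q, q < prods.length → pOwn r.1 q = pOwn prods q ∧ pStr r.1 q = pStr prods q ∧
        pCnt r.1 q = pCnt prods q - (if q ∈ l then 1 else 0)) ∧
      (∀ m, r.2.getD m false = true ↔
        ready.getD m false = true ∨ ∃ pid ∈ l, pOwn prods pid = m ∧ pCnt prods pid = 1) := by
  intro l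
  induction l with
  | nil =>
    intro prods ready _ _
    refine ⟨rfl, fun q _ => ⟨rfl, rfl, by simp [pvDecs]⟩, fun m => by simp [pvDecs]⟩
  | cons pid rest ih =>
    intro prods ready hnd hb
    obtain ⟨hpm, hnd'⟩ := List.nodup_cons.1 hnd
    have hpl : pid < prods.length := hb pid (by simp)
    have hstep : pvDecs prods ready (pid :: rest)
        = pvDecs (prods.set pid ((prods.getD pid ("", "", 0)).1, (prods.getD pid ("", "", 0)).2.1,
            (prods.getD pid ("", "", 0)).2.2 - 1))
          (if (prods.getD pid ("", "", 0)).2.2 - 1 == 0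
            then ready.insert (prods.getD pid ("", "", 0)).1 true else ready) rest := rfl
    set t := prods.getD pid ("", "", 0) with ht
    set prods' := prods.set pid (t.1, t.2.1, t.2.2 - 1) with hp'
    set ready' := (if t.2.2 - 1 == 0 then ready.insert t.1 true else ready) with hr'
    have hlen' : prods'.length = prods.length := by simp [hp']
    have hOwnE : ∀ q, q < prods.length → pOwn prods' q = pOwn prods q := by
      intro q _
      by_cases hqp : q = pid
      · subst hqp; unfold pOwn; rw [hp', getD_set_self _ _ _ _ hpl]
      · unfold pOwn; rw [hp', getD_set_ne _ _ _ _ _ hqp]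
    have hStrE : ∀ q, q < prods.length → pStr prods' q = pStr prods q := by
      intro q _
      by_cases hqp : q = pid
      · subst hqp; unfold pStr; rw [hp', getD_set_self _ _ _ _ hpl]
      · unfold pStr; rw [hp', getD_set_ne _ _ _ _ _ hqp]
    have hCntE : ∀ q, q < prods.length →
        pCnt prods' q = pCnt prods q - (if q = pid then 1 else 0) := by
      intro q _
      by_cases hqp : q = pid
      · subst hqp; unfold pCnt; rw [hp', getD_set_self _ _ _ _ hpl]; simp [ht]
      · unfold pCnt; rw [hp', getD_set_ne _ _ _ _ _ hqp]; simp [hqp]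
    have hbb : ∀ q ∈ rest, q < prods'.length := by
      intro q hq; rw [hlen']; exact hb q (by simp [hq])
    obtain ⟨ih1, ih2, ih3⟩ := ih prods' ready' hnd' hbb
    rw [hstep]
    refine ⟨ih1.trans hlen', ?_, ?_⟩
    · intro q hq
      obtain ⟨jo, js, jc⟩ := ih2 q (hlen' ▸ hq)
      refine ⟨jo.trans (hOwnE q hq), js.trans (hStrE q hq), ?_⟩
      rw [jc, hCntE q hq]
      by_cases h1 : q = pid
      · subst h1
        simp [hpm]
      · simp only [List.mem_cons, h1, false_or]
        by_cases h2 : q ∈ rest <;> simp [h2]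
    · intro m
      rw [ih3 m]
      have hrest : (∃ q ∈ rest, pOwn prods' q = m ∧ pCnt prods' q = 1)
          ↔ ∃ q ∈ rest, pOwn prods q = m ∧ pCnt prods q = 1 := by
        constructor
        · rintro ⟨q, hq, ho, hc⟩
          have hql : q < prods.length := hb q (by simp [hq])
          have hqp : q ≠ pid := fun he => hpm (he ▸ hq)
          have ho' : pOwn prods q = m := by rw [← hOwnE q hql]; exact ho
          refine ⟨q, hq, ho', ?_⟩
          have hcc := hCntE q hql
          rw [if_neg hqp] at hcc
          omega
        · rintro ⟨q, hq, ho, hc⟩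
          have hql : q < prods.length := hb q (by simp [hq])
          have hqp : q ≠ pid := fun he => hpm (he ▸ hq)
          have ho' : pOwn prods' q = m := by rw [hOwnE q hql]; exact ho
          refine ⟨q, hq, ho', ?_⟩
          have hcc := hCntE q hql
          rw [if_neg hqp] at hcc
          omega
      rw [hrest]
      by_cases hz : (t.2.2 - 1 == 0) = true
      · have hz' : pCnt prods pid = 1 := by
          have : t.2.2 - 1 = 0 := by exact_mod_cast (beq_iff_eq).1 hz
          unfold pCnt; rw [← ht]; omega
        rw [hr', if_pos hz, PySem.Dict.getD_insert]
        constructor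
        · rintro (h | h)
          · split_ifs at h with he
            · exact Or.inr ⟨pid, by simp, by unfold pOwn; rw [← ht, he], hz'⟩
            · exact Or.inl h
          · rcases h with ⟨q, hq, ho, hc⟩
            exact Or.inr ⟨q, by simp [hq], ho, hc⟩
        · rintro (h | h)
          · left; split_ifs with he
            · rfl
            · exact h
          · rcases h with ⟨q, hq, ho, hc⟩
            rcases List.mem_cons.1 hq with rfl | hq'
            · left
              have : m = t.1 := by unfold pOwn at ho; rw [← ht] at ho; exact ho.symm
              rw [if_pos this]
            · exact Or.inr ⟨q, hq', ho, hc⟩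
      · have hz' : pCnt prods pid ≠ 1 := by
          intro hc
          apply hz
          have : t.2.2 = 1 := by unfold pCnt at hc; rw [← ht] at hc; exact hc
          rw [this]; rfl
        rw [hr', if_neg hz]
        constructor
        · rintro (h | ⟨q, hq, ho, hc⟩)
          · exact Or.inl h
          · exact Or.inr ⟨q, by simp [hq], ho, hc⟩
        · rintro (h | ⟨q, hq, ho, hc⟩)
          · exact Or.inl h
          · rcases List.mem_cons.1 hq with rfl | hq'
            · exact absurd hc hz'
            · exact Or.inr ⟨q, hq', ho, hc⟩

theorem ready_iff_any (g : List (String × List String))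
    (by_nt : PySem.Dict String (List Nat)) (S : PySem.Set String)
    (prods : List (String × String × Int)) (ready : PySem.Dict String Bool) (nt : String)
    (hC : CntInv S prods) (hR : ReadyInv prods ready) (hN : NtSpec g prods by_nt nt) :
    ready.getD nt false = pvAnyProd S (pvLookup g nt) := by
  obtain ⟨_, hmem, hmap, hconv⟩ := hN
  have hiff : ready.getD nt false = true ↔ pvAnyProd S (pvLookup g nt) = true := by
    rw [hR nt]
    constructor
    · rintro ⟨pid, hpl, ho, hc⟩
      have hin : pid ∈ by_nt.getD nt [] := hconv pid hpl ho
      have hpp : pStr prods pid ∈ pvLookup g nt := by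
        rw [← hmap]; exact List.mem_map_of_mem hin
      have hall : pvProdAll S (pStr prods pid) = true := by
        rw [← pend_len_zero_iff]
        have := hC pid hpl
        omega
      exact List.any_eq_true.2 ⟨pStr prods pid, hpp, hall⟩
    · intro h
      obtain ⟨p, hp, hall⟩ := List.any_eq_true.1 h
      rw [← hmap] at hp
      obtain ⟨pid, hpid, rfl⟩ := List.mem_map.1 hp
      obtain ⟨hpl, ho⟩ := hmem pid hpid
      refine ⟨pid, hpl, ho, ?_⟩
      rw [← pend_len_zero_iff] at hall
      have := hC pid hpl
      omega
  cases hA : pvAnyProd S (pvLookup g nt)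
  · cases hRr : ready.getD nt false
    · rfl
    · rw [hA] at hiff; exact absurd (hiff.1 hRr) (by simp)
  · exact hiff.2 hA

theorem NtSpec_pres (g : List (String × List String)) (by_nt : PySem.Dict String (List Nat))
    (prods prods' : List (String × String × Int)) (m : String)
    (hp : Pres prods prods') (h : NtSpec g prods by_nt m) : NtSpec g prods' by_nt m := by
  obtain ⟨hlen, hcomp⟩ := hp
  obtain ⟨hc, hmem, hmap, hconv⟩ := h
  refine ⟨hc, ?_, ?_, ?_⟩
  · intro pid hpid
    obtain ⟨hl, ho⟩ := hmem pid hpid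
    exact ⟨hlen ▸ hl, (hcomp pid hl).1.trans ho⟩
  · rw [← hmap]
    apply List.map_congr_left
    intro pid hpid
    exact (hcomp pid (hmem pid hpid).1).2
  · intro pid hpl ho
    rw [hlen] at hpl
    rw [(hcomp pid hpl).1] at ho
    exact hconv pid hpl ho

theorem finalize_step (g : List (String × List String)) (_by_nt : PySem.Dict String (List Nat))
    (S : PySem.Set String) (prods : List (String × String × Int))
    (ready : PySem.Dict String Bool) (occ : PySem.Dict String (List Nat)) (nt : String)
    (hC : CntInv S prods) (hR : ReadyInv prods ready) (hO : OccInv S prods occ)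
    (hnt : PySem.Set.contains S nt = false) :
    let l := occ.getD nt []
    let r := pvDecs prods ready l
    Pres prods r.1 ∧ CntInv (PySem.Set.add S nt) r.1 ∧ ReadyInv r.1 r.2 ∧
      OccInv (PySem.Set.add S nt) r.1 (occ.erase nt) := by
  intro l r
  obtain ⟨hlnd, hliff⟩ := hO nt
  have hlb : ∀ pid ∈ l, pid < prods.length := fun pid hp => ((hliff pid).1 hp).2.1
  obtain ⟨d1, d2, d3⟩ := decs_spec g l prods ready hlnd hlb
  have hmeml : ∀ pid, pid ∈ l ↔ pid < prods.length ∧ nt ∈ pvCharStrs (pStr prods pid) := by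
    intro pid
    rw [hliff pid]
    constructor
    · rintro ⟨_, h1, h2⟩; exact ⟨h1, h2⟩
    · rintro ⟨h1, h2⟩; exact ⟨hnt, h1, h2⟩
  have hPres : Pres prods r.1 := ⟨d1, fun pid hp => ⟨(d2 pid hp).1, (d2 pid hp).2.1⟩⟩
  refine ⟨hPres, ?_, ?_, ?_⟩
  · -- CntInv at add S nt
    intro pid hpl
    rw [d1] at hpl
    obtain ⟨ho, hs, hcnt⟩ := d2 pid hpl
    rw [hs, hcnt, hC pid hpl, length_pend_add]
    have : nt ∈ pvPend S (pStr prods pid) ↔ pid ∈ l := by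
      rw [mem_pend, hmeml pid]
      constructor
      · rintro ⟨hm, _⟩; exact ⟨hpl, hm⟩
      · rintro ⟨_, hm⟩; exact ⟨hm, hnt⟩
    by_cases hm : nt ∈ pvPend S (pStr prods pid)
    · rw [if_pos hm, if_pos (this.1 hm)]
    · rw [if_neg hm, if_neg (fun hh => hm (this.2 hh))]
  · -- ReadyInv
    intro m
    rw [d3 m]
    constructor
    · rintro (h | ⟨pid, hpid, ho, hc⟩)
      · obtain ⟨pid, hpl, ho, hc⟩ := (hR m).1 h
        have hnl : pid ∉ l := by
          intro hin
          have hm : nt ∈ pvPend S (pStr prods pid) := by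
            rw [mem_pend]
            exact ⟨((hmeml pid).1 hin).2, hnt⟩
          have := hC pid hpl
          have hpos := List.length_pos_of_mem hm
          omega
        obtain ⟨o2, _, c2⟩ := d2 pid hpl
        refine ⟨pid, d1 ▸ hpl, o2.trans ho, ?_⟩
        rw [c2, if_neg hnl]
        omega
      · have hpl : pid < prods.length := hlb pid hpid
        obtain ⟨o2, _, c2⟩ := d2 pid hpl
        refine ⟨pid, d1 ▸ hpl, o2.trans ho, ?_⟩
        rw [c2, if_pos hpid]
        omega
    · rintro ⟨pid, hpl, ho, hc⟩
      rw [d1] at hpl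
      obtain ⟨o2, _, c2⟩ := d2 pid hpl
      rw [c2] at hc
      by_cases hin : pid ∈ l
      · rw [if_pos hin] at hc
        exact Or.inr ⟨pid, hin, o2.symm.trans ho, by omega⟩
      · rw [if_neg hin] at hc
        exact Or.inl ((hR m).2 ⟨pid, hpl, o2.symm.trans ho, by omega⟩)
  · -- OccInv at add S nt with occ.erase nt
    intro x
    by_cases hx : x = nt
    · subst hx
      rw [getD_erase_self]
      refine ⟨List.nodup_nil, fun pid => ?_⟩
      simp
    · rw [getD_erase_ne _ _ _ _ hx]
      obtain ⟨hxnd, hxiff⟩ := hO x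
      refine ⟨hxnd, fun pid => ?_⟩
      rw [hxiff pid, contains_add]
      constructor
      · rintro ⟨hcx, hpl, hm⟩
        refine ⟨by rw [hcx]; simp [hx], d1 ▸ hpl, ?_⟩
        rw [(d2 pid hpl).2.1]
        exact hm
      · rintro ⟨hcx, hpl, hm⟩
        rw [d1] at hpl
        have hcx' : PySem.Set.contains S x = false := by
          revert hcx; cases PySem.Set.contains S x <;> simp
        refine ⟨hcx', hpl, ?_⟩
        rw [← (d2 pid hpl).2.1]
        exact hm

theorem pass_eq (g : List (String × List String)) (by_nt : PySem.Dict String (List Nat)) :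
    ∀ (it : List String) (S : PySem.Set String) (prods : List (String × String × Int))
      (ready : PySem.Dict String Bool) (occ : PySem.Dict String (List Nat))
      (ch : Bool) (added : Int),
      CntInv S prods → ReadyInv prods ready → OccInv S prods occ →
      (∀ m ∈ it, NtSpec g prods by_nt m) →
      ∃ Δ : List String,
        pvPassA g it S ch = (S ++ Δ, ch || !Δ.isEmpty) ∧
        (pvPassB it ⟨S, prods, ready, occ⟩ added).2 = added + Δ.length ∧
        (pvPassB it ⟨S, prods, ready, occ⟩ added).1.S = S ++ Δ ∧
        Pres prods (pvPassB it ⟨S, prods, ready, occ⟩ added).1.prods ∧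
        CntInv (S ++ Δ) (pvPassB it ⟨S, prods, ready, occ⟩ added).1.prods ∧
        ReadyInv (pvPassB it ⟨S, prods, ready, occ⟩ added).1.prods
          (pvPassB it ⟨S, prods, ready, occ⟩ added).1.ready ∧
        OccInv (S ++ Δ) (pvPassB it ⟨S, prods, ready, occ⟩ added).1.prods
          (pvPassB it ⟨S, prods, ready, occ⟩ added).1.occ := by
  intro it
  induction it with
  | nil =>
    intro S prods ready occ ch added hC hR hO _
    exact ⟨[], by simp [pvPassA], by simp [pvPassB], by simp [pvPassB], Pres_refl prods,
      by simpa using hC, hR, by simpa using hO⟩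
  | cons nt rest ih =>
    intro S prods ready occ ch added hC hR hO hN
    have hNnt := hN nt (by simp)
    have hNrest : ∀ m ∈ rest, NtSpec g prods by_nt m := fun m hm => hN m (by simp [hm])
    have hrdy := ready_iff_any g by_nt S prods ready nt hC hR hNnt
    by_cases hcs : PySem.Set.contains S nt = true
    · have hmem : nt ∈ S := contains_iff_mem.1 hcs
      have hA : pvPassA g (nt :: rest) S ch = pvPassA g rest S ch := passA_cons_mem hmem
      have hB : pvPassB (nt :: rest) ⟨S, prods, ready, occ⟩ added
          = pvPassB rest ⟨S, prods, ready, occ⟩ added := by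
        simp only [pvPassB, hcs, Bool.not_true, Bool.false_and]
        rw [if_neg Bool.false_ne_true]
      rw [hA, hB]
      exact ih S prods ready occ ch added hC hR hO hNrest
    · have hcs' : PySem.Set.contains S nt = false := by
        revert hcs; cases PySem.Set.contains S nt <;> simp
      have hnm : nt ∉ S := not_contains_iff.1 hcs'
      by_cases hb : pvAnyProd S (pvLookup g nt) = true
      · have hrt : ready.getD nt false = true := by rw [hrdy, hb]
        have hadd : PySem.Set.add S nt = S ++ [nt] := set_add_of_not_mem hnm
        obtain ⟨hPres, hC', hR', hO'⟩ := finalize_step g by_nt S prods ready occ nt hC hR hO hcs'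
        have hBstep : pvPassB (nt :: rest) ⟨S, prods, ready, occ⟩ added
            = pvPassB rest ⟨PySem.Set.add S nt, (pvDecs prods ready (occ.getD nt [])).1,
                (pvDecs prods ready (occ.getD nt [])).2, occ.erase nt⟩ (added + 1) := by
          simp only [pvPassB, hcs', hrt, Bool.not_false, Bool.true_and]
          simp
        have hAstep : pvPassA g (nt :: rest) S ch
            = pvPassA g rest (PySem.Set.add S nt) (ch || true) := by
          rw [passA_cons_not_mem hnm, tryNT_eq, if_pos hb]
        rw [hAstep, hBstep]
        obtain ⟨Δ, a1, b2, b3, bp, c1, r1, o1⟩ :=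
          ih (PySem.Set.add S nt) (pvDecs prods ready (occ.getD nt [])).1
            (pvDecs prods ready (occ.getD nt [])).2 (occ.erase nt) (ch || true) (added + 1)
            hC' hR' hO' (fun m hm => NtSpec_pres g by_nt _ _ m hPres (hNrest m hm))
        have heq : S ++ nt :: Δ = (PySem.Set.add S nt) ++ Δ := by rw [hadd]; simp
        refine ⟨nt :: Δ, ?_, ?_, ?_, ?_, ?_, ?_, ?_⟩
        · rw [a1, heq]
          simp
        · rw [b2]
          simp only [List.length_cons]
          push_cast
          ring
        · rw [b3, heq]
        · exact Pres_trans hPres bp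
        · rw [heq]; exact c1
        · exact r1
        · rw [heq]; exact o1
      · have hb' : pvAnyProd S (pvLookup g nt) = false := by
          revert hb; cases pvAnyProd S (pvLookup g nt) <;> simp
        have hrf : ready.getD nt false = false := by rw [hrdy, hb']
        have hA : pvPassA g (nt :: rest) S ch = pvPassA g rest S ch := by
          rw [passA_cons_not_mem hnm, tryNT_eq, if_neg (by simp [hb'])]
          simp
        have hB : pvPassB (nt :: rest) ⟨S, prods, ready, occ⟩ added
            = pvPassB rest ⟨S, prods, ready, occ⟩ added := by
          simp only [pvPassB, hrf, Bool.and_false]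
          rw [if_neg Bool.false_ne_true]
        rw [hA, hB]
        exact ih S prods ready occ ch added hC hR hO hNrest

theorem loop_eq (g : List (String × List String)) (by_nt : PySem.Dict String (List Nat))
    (nts : List String) :
    ∀ (fuel : Nat) (S : PySem.Set String) (prods : List (String × String × Int))
      (ready : PySem.Dict String Bool) (occ : PySem.Dict String (List Nat)),
      CntInv S prods → ReadyInv prods ready → OccInv S prods occ →
      (∀ m ∈ nts, NtSpec g prods by_nt m) →
      (pvLoopB nts fuel ⟨S, prods, ready, occ⟩).S = pvLoopA g nts fuel S ∧
      CntInv (pvLoopB nts fuel ⟨S, prods, ready, occ⟩).S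
        (pvLoopB nts fuel ⟨S, prods, ready, occ⟩).prods ∧
      (∀ m ∈ nts, NtSpec g (pvLoopB nts fuel ⟨S, prods, ready, occ⟩).prods by_nt m) := by
  intro fuel
  induction fuel with
  | zero =>
    intro S prods ready occ hC _ _ hN
    exact ⟨rfl, hC, hN⟩
  | succ fuel ih =>
    intro S prods ready occ hC hR hO hN
    obtain ⟨Δ, a1, b2, b3, bp, c1, r1, o1⟩ :=
      pass_eq g by_nt nts S prods ready occ false 0 hC hR hO hN
    have hN' : ∀ m ∈ nts, NtSpec g (pvPassB nts ⟨S, prods, ready, occ⟩ 0).1.prods by_nt m :=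
      fun m hm => NtSpec_pres g by_nt _ _ m bp (hN m hm)
    rcases hΔ : Δ with _ | ⟨d, Δ'⟩
    · subst hΔ
      have hA1 : pvPassA g nts S false = (S, false) := by rw [a1]; simp
      have hB2 : (((pvPassB nts ⟨S, prods, ready, occ⟩ 0).2) == 0) = true := by rw [b2]; simp
      have hS : (pvPassB nts ⟨S, prods, ready, occ⟩ 0).1.S = S := by rw [b3]; simp
      have hLA : pvLoopA g nts (fuel + 1) S = S := by
        simp [pvLoopA, hA1]
      have hLB : pvLoopB nts (fuel + 1) ⟨S, prods, ready, occ⟩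
          = (pvPassB nts ⟨S, prods, ready, occ⟩ 0).1 := by
        simp only [pvLoopB, hB2, if_true]
      rw [hLA, hLB]
      refine ⟨hS, ?_, hN'⟩
      rw [hS]
      simpa using c1
    · subst hΔ
      have hA1 : pvPassA g nts S false = (S ++ d :: Δ', true) := by rw [a1]; simp
      have hB2 : (((pvPassB nts ⟨S, prods, ready, occ⟩ 0).2) == 0) = false := by
        rw [b2]
        have hne : (0 : Int) + ((d :: Δ').length : Int) ≠ 0 := by
          simp only [List.length_cons]
          push_cast
          omega
        exact beq_eq_false_iff_ne.2 hne
      have hLA : pvLoopA g nts (fuel + 1) S = pvLoopA g nts fuel (S ++ d :: Δ') := by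
        simp [pvLoopA, hA1]
      have hLB : pvLoopB nts (fuel + 1) ⟨S, prods, ready, occ⟩
          = pvLoopB nts fuel (pvPassB nts ⟨S, prods, ready, occ⟩ 0).1 := by
        simp only [pvLoopB, hB2, Bool.false_eq_true, if_false]
      rw [hLA, hLB, ← b3]
      rw [← b3] at c1 o1
      exact ih (pvPassB nts ⟨S, prods, ready, occ⟩ 0).1.S
        (pvPassB nts ⟨S, prods, ready, occ⟩ 0).1.prods
        (pvPassB nts ⟨S, prods, ready, occ⟩ 0).1.ready
        (pvPassB nts ⟨S, prods, ready, occ⟩ 0).1.occ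
        c1 r1 o1 hN'

-- ---- final build ------ ---- final build ----
theorem build_entry (c : String → Bool) (k : String) :
    ∀ (ps : List String) (D : PySem.Dict String (List String)) (v : PySem.Set String),
      ps.foldl (fun d p => if c p then d.modify k PySem.Set.empty (fun s => PySem.Set.add s p) else d) (D.insert k v)
      = D.insert k (ps.foldl (fun s p => if c p then PySem.Set.add s p else s) v) := by
  intro ps
  induction ps with
  | nil => intro D v; simp
  | cons p rest ih =>
    intro D v
    by_cases hp : c p = true
    · simp only [List.foldl_cons, hp, if_true, PySem.Dict.modify,
        PySem.Dict.getD_insert_self, PySem.Dict.insert_insert_self]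
      exact ih D (PySem.Set.add v p)
    · have hp' : c p = false := by revert hp; cases c p <;> simp
      simp only [List.foldl_cons, hp', Bool.false_eq_true, if_false]
      exact ih D v

theorem ofList_filter_eq_foldl (c : String → Bool) (ps : List String) :
    PySem.Set.ofList (ps.filter c) = ps.foldl (fun s p => if c p then PySem.Set.add s p else s) [] := by
  rw [PySem.Set.ofList, List.foldl_filter]
  rfl

theorem buildA_eq (g : List (String × List String)) (S : PySem.Set String) :
    ∀ (nts : List String) (D : PySem.Dict String (List String)),
      pvBuildA g S nts D
      = nts.foldl
          (fun d nt =>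
            if PySem.Set.contains S nt then
              d.insert nt (PySem.Set.ofList ((pvLookup g nt).filter (fun p => pvProdAll S p)))
            else d) D := by
  intro nts
  induction nts with
  | nil => intro D; rfl
  | cons nt rest ih =>
    intro D
    by_cases h : PySem.Set.contains S nt = true
    · simp only [pvBuildA, h, if_true, List.foldl_cons]
      rw [build_entry, ih, ofList_filter_eq_foldl]
      rfl
    · have h' : PySem.Set.contains S nt = false := by revert h; cases PySem.Set.contains S nt <;> simp
      simp only [pvBuildA, h', Bool.false_eq_true, if_false, List.foldl_cons]
      exact ih D

theorem build_eq (g : List (String × List String)) (by_nt : PySem.Dict String (List Nat))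
    (S : PySem.Set String) (prods : List (String × String × Int)) (nts : List String)
    (hC : CntInv S prods) (hN : ∀ m ∈ nts, NtSpec g prods by_nt m) :
    pvBuildA g S nts PySem.Dict.empty = pvBuildB S prods by_nt nts := by
  rw [buildA_eq]
  unfold pvBuildB
  suffices h : ∀ (l : List String), (∀ m ∈ l, NtSpec g prods by_nt m) →
      ∀ d : PySem.Dict String (List String),
      l.foldl
        (fun d nt =>
          if PySem.Set.contains S nt then
            d.insert nt (PySem.Set.ofList ((pvLookup g nt).filter (fun p => pvProdAll S p)))
          else d) d
      = l.foldl
          (fun d nt =>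
            if PySem.Set.contains S nt then
              d.insert nt (PySem.Set.ofList
                (((by_nt.getD nt []).filter (fun pid => (prods.getD pid ("", "", 0)).2.2 == 0)).map
                  (fun pid => (prods.getD pid ("", "", 0)).2.1)))
            else d) d by
    exact h nts hN _
  intro l hl
  induction l with
  | nil => intro d; rfl
  | cons nt rest ihl =>
    intro d
    simp only [List.foldl_cons]
    have hrest : ∀ m ∈ rest, NtSpec g prods by_nt m := fun m hm => hl m (by simp [hm])
    by_cases hc : PySem.Set.contains S nt = true
    · obtain ⟨_, hmem, hmap, _⟩ := hl nt (by simp)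
      have hv : (((by_nt.getD nt []).filter (fun pid => (prods.getD pid ("", "", 0)).2.2 == 0)).map
            (fun pid => (prods.getD pid ("", "", 0)).2.1))
          = (pvLookup g nt).filter (fun p => pvProdAll S p) := by
        rw [← hmap]
        apply filter_map_comm
        intro pid hpid
        obtain ⟨hpl, _⟩ := hmem pid hpid
        have hcnt := hC pid hpl
        show (pCnt prods pid == 0) = pvProdAll S (pStr prods pid)
        rw [hcnt]
        by_cases hpz : (pvPend S (pStr prods pid)).length = 0
        · rw [hpz, (pend_len_zero_iff S (pStr prods pid)).1 hpz]
          rfl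
        · have h2 : pvProdAll S (pStr prods pid) = false := by
            cases hh : pvProdAll S (pStr prods pid)
            · rfl
            · exact absurd ((pend_len_zero_iff S (pStr prods pid)).2 hh) hpz
          rw [h2]
          have h1 : ((pvPend S (pStr prods pid)).length : Int) ≠ 0 := by exact_mod_cast hpz
          exact beq_eq_false_iff_ne.2 h1
      rw [if_pos hc, if_pos hc, hv]
      exact ihl hrest _
    · have hc' : PySem.Set.contains S nt = false := by
        revert hc; cases PySem.Set.contains S nt <;> simp
      rw [if_neg (by rw [hc']; simp), if_neg (by rw [hc']; simp)]
      exact ihl hrest _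

theorem main_eq (g : List (String × List String)) (terms nts : List String) :
    function_remove_unproductive g terms nts = function_remove_unproductive_alt g terms nts := by
  have hreg0 : RegOK g (PySem.Set.ofList terms)
      ⟨[], PySem.Dict.empty, PySem.Dict.empty, PySem.Dict.empty⟩ := by
    refine ⟨?_, ?_, ?_, ?_, ?_⟩
    · intro pid h; simp at h
    · intro m
      constructor
      · intro h; rw [PySem.Dict.getD_empty] at h; cases h
      · rintro ⟨q, hq, _⟩; simp at hq
    · intro x
      refine ⟨by rw [PySem.Dict.getD_empty]; exact List.nodup_nil, fun pid => ?_⟩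
      constructor
      · intro h; rw [PySem.Dict.getD_empty] at h; simp at h
      · rintro ⟨_, hq, _⟩; simp at hq
    · intro m hm; rw [PySem.Dict.contains_empty] at hm; cases hm
    · intro m _ q hq; simp at hq
  obtain ⟨⟨hC0, hR0, hO0, hNt0, _⟩, hmem0, _⟩ :=
    register_spec g (PySem.Set.ofList terms) nts
      ⟨[], PySem.Dict.empty, PySem.Dict.empty, PySem.Dict.empty⟩ hreg0
  have hNall : ∀ m ∈ nts,
      NtSpec g (pvRegister g (PySem.Set.ofList terms) nts
          ⟨[], PySem.Dict.empty, PySem.Dict.empty, PySem.Dict.empty⟩).prods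
        (pvRegister g (PySem.Set.ofList terms) nts
          ⟨[], PySem.Dict.empty, PySem.Dict.empty, PySem.Dict.empty⟩).by_nt m :=
    fun m hm => hNt0 m (hmem0 m hm)
  obtain ⟨hS, hCf, hNf⟩ :=
    loop_eq g (pvRegister g (PySem.Set.ofList terms) nts
        ⟨[], PySem.Dict.empty, PySem.Dict.empty, PySem.Dict.empty⟩).by_nt nts
      (nts.length + 1) (PySem.Set.ofList terms)
      (pvRegister g (PySem.Set.ofList terms) nts
        ⟨[], PySem.Dict.empty, PySem.Dict.empty, PySem.Dict.empty⟩).prods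
      (pvRegister g (PySem.Set.ofList terms) nts
        ⟨[], PySem.Dict.empty, PySem.Dict.empty, PySem.Dict.empty⟩).ready
      (pvRegister g (PySem.Set.ofList terms) nts
        ⟨[], PySem.Dict.empty, PySem.Dict.empty, PySem.Dict.empty⟩).occ
      hC0 hR0 hO0 hNall
  have hbuild := build_eq g
    (pvRegister g (PySem.Set.ofList terms) nts
      ⟨[], PySem.Dict.empty, PySem.Dict.empty, PySem.Dict.empty⟩).by_nt
    _ _ nts hCf hNf
  show ((pvBuildA g (pvLoopA g nts (nts.length + 1) (PySem.Set.ofList terms)) nts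
          PySem.Dict.empty).items, terms,
        pvLoopA g nts (nts.length + 1) (PySem.Set.ofList terms))
      = ((pvBuildB
            (pvLoopB nts (nts.length + 1)
              ⟨PySem.Set.ofList terms,
               (pvRegister g (PySem.Set.ofList terms) nts
                 ⟨[], PySem.Dict.empty, PySem.Dict.empty, PySem.Dict.empty⟩).prods,
               (pvRegister g (PySem.Set.ofList terms) nts
                 ⟨[], PySem.Dict.empty, PySem.Dict.empty, PySem.Dict.empty⟩).ready,
               (pvRegister g (PySem.Set.ofList terms) nts
                 ⟨[], PySem.Dict.empty, PySem.Dict.empty, PySem.Dict.empty⟩).occ⟩).S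
            (pvLoopB nts (nts.length + 1)
              ⟨PySem.Set.ofList terms,
               (pvRegister g (PySem.Set.ofList terms) nts
                 ⟨[], PySem.Dict.empty, PySem.Dict.empty, PySem.Dict.empty⟩).prods,
               (pvRegister g (PySem.Set.ofList terms) nts
                 ⟨[], PySem.Dict.empty, PySem.Dict.empty, PySem.Dict.empty⟩).ready,
               (pvRegister g (PySem.Set.ofList terms) nts
                 ⟨[], PySem.Dict.empty, PySem.Dict.empty, PySem.Dict.empty⟩).occ⟩).prods
            (pvRegister g (PySem.Set.ofList terms) nts
              ⟨[], PySem.Dict.empty, PySem.Dict.empty, PySem.Dict.empty⟩).by_nt nts).items,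
         terms,
         (pvLoopB nts (nts.length + 1)
            ⟨PySem.Set.ofList terms,
             (pvRegister g (PySem.Set.ofList terms) nts
               ⟨[], PySem.Dict.empty, PySem.Dict.empty, PySem.Dict.empty⟩).prods,
             (pvRegister g (PySem.Set.ofList terms) nts
               ⟨[], PySem.Dict.empty, PySem.Dict.empty, PySem.Dict.empty⟩).ready,
             (pvRegister g (PySem.Set.ofList terms) nts
               ⟨[], PySem.Dict.empty, PySem.Dict.empty, PySem.Dict.empty⟩).occ⟩).S)
  rw [← hS, hbuild]

-- ===== VERDICT (by name: the statement is the Claim_ definition above) =====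
theorem function_remove_unproductive_spec : Claim_equal_function_remove_unproductive := by
  intro g terms nts _
  unfold Spec_function_remove_unproductive
  exact main_eq g terms nts
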